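-- pv_equiv track=rewrite | github.com/AliakseiPV/DZ_Python | DZ4/NonRepeatingList.py | NonRepeatingList
-- ===== SOURCE A (Python) =====
-- def NonRepeatingList(list1, list2, list3):
--     count = 0
--     for i in list2:
--
--         for j in list1:
--             if (i == j):
--                 count += 1
--
--         if(count <= 1):
--             list3.append(i)
--         count = 0
--     return list3
-- ===== SOURCE B (Python) =====
-- def NonRepeatingList(list1, list2, list3):
--     seen = set()
--     dup = set()
--     for j in list1:
--         if j in seen:
--             dup.add(j)
--         else:
--             seen.add(j)
--     for i in list2:
--         if i not in dup:
--             list3.append(i)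
--     return list3
-- ===== Notes on version B (the rewrite author's own statement) =====
-- stated objective: faster
-- what changed: Replaces the nested per-element rescan of list1 with one pass over list1 building a set of duplicated values, then one set-membership filtering pass over list2.
import Mathlib
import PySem

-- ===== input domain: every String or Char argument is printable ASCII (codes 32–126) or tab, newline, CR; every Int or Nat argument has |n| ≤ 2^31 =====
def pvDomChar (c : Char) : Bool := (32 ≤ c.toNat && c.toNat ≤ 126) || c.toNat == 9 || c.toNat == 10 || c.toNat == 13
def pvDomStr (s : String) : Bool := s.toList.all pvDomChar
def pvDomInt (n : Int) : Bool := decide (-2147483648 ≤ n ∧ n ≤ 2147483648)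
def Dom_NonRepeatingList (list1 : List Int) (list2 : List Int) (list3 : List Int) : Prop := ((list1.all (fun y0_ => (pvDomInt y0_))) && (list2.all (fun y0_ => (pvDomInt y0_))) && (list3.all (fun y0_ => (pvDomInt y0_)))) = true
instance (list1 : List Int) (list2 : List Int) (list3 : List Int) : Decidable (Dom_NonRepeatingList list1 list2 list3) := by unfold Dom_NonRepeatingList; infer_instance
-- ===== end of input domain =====

-- B builds a set of values occurring ≥2 times in list1 in one pass, then filters list2 by set
-- membership, replacing A's per-element rescan of list1. Both Pythons append to list3 in place;
-- the equivalence proved is about the return value.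


-- ===== PORT A =====
-- for i in list2: count occurrences of i in list1 by an inner scan; append i if count <= 1
def NonRepeatingList (list1 : List Int) (list2 : List Int) (list3 : List Int) : List Int :=
  list2.foldl (fun acc i =>
    let count : Int := list1.foldl (fun c j => if i == j then c + 1 else c) 0
    if count ≤ 1 then acc ++ [i] else acc) list3

-- ===== PORT B =====
-- one pass over list1 building (seen, dup) sets; then filter list2 by 'i not in dup'
def NonRepeatingList_alt (list1 : List Int) (list2 : List Int) (list3 : List Int) : List Int :=
  let sd : PySem.Set Int × PySem.Set Int :=
    list1.foldl (fun p j =>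
      if PySem.Set.contains p.1 j then (p.1, PySem.Set.add p.2 j)
      else (PySem.Set.add p.1 j, p.2)) (PySem.Set.empty, PySem.Set.empty)
  list2.foldl (fun acc i =>
    if PySem.Set.contains sd.2 i then acc else acc ++ [i]) list3

-- ===== PRECONDITION & SPEC =====
def Spec_NonRepeatingList (list1 : List Int) (list2 : List Int) (list3 : List Int) (out : List Int) : Prop := out = NonRepeatingList_alt list1 list2 list3
instance (list1 : List Int) (list2 : List Int) (list3 : List Int) (out : List Int) : Decidable (Spec_NonRepeatingList list1 list2 list3 out) := by unfold Spec_NonRepeatingList; infer_instance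

-- ===== CLAIM (what is proved, stated in full; the proofs are below) =====
def Claim_equal_NonRepeatingList : Prop := ∀ (list1 : List Int) (list2 : List Int) (list3 : List Int), Dom_NonRepeatingList list1 list2 list3 → Spec_NonRepeatingList list1 list2 list3 (NonRepeatingList list1 list2 list3)

-- ===== LEMMAS AND PROOFS =====

-- A's inner scan computes the count of i in list1
theorem count_fold (list1 : List Int) (i : Int) (c : Int) :
    list1.foldl (fun c j => if i == j then c + 1 else c) c = c + (list1.count i : Int) := by
  induction list1 generalizing c with
  | nil => simp
  | cons j t ih =>
    simp only [List.foldl_cons, List.count_cons, ih]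
    by_cases h : i = j
    · simp [h]; push_cast; ring
    · simp [h, Ne.symm h, beq_iff_eq]

-- B's first pass, as a named helper for the lemmas (definitionally the fold inside NonRepeatingList_alt)
def dfold (list1 : List Int) (s d : PySem.Set Int) : PySem.Set Int × PySem.Set Int :=
  list1.foldl (fun (p : PySem.Set Int × PySem.Set Int) j =>
        if PySem.Set.contains p.1 j then (p.1, PySem.Set.add p.2 j)
        else (PySem.Set.add p.1 j, p.2)) (s, d)

-- the dup set of B's first pass holds exactly the values occurring ≥ 2 times (plus the invariant on seen)
theorem dup_fold (list1 : List Int) (s d : PySem.Set Int) (x : Int) :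
    (x ∈ (dfold list1 s d).2
      ↔ x ∈ d ∨ (x ∈ s ∧ x ∈ list1) ∨ 2 ≤ list1.count x) := by
  induction list1 generalizing s d with
  | nil => simp [dfold]
  | cons j t ih =>
    have hmem : x ∈ t ↔ 1 ≤ t.count x := by
      constructor
      · exact fun h => List.count_pos_iff.mpr h
      · exact fun h => List.count_pos_iff.mp h
    simp only [dfold, List.foldl_cons]
    by_cases hj : j ∈ s
    · rw [if_pos (by simpa using hj)]
      rw [show (List.foldl _ _ t : PySem.Set Int × PySem.Set Int) = dfold t s (PySem.Set.add d j) from rfl, ih]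
      by_cases hx : x = j
      · subst hx
        simp only [PySem.Set.mem_add, List.count_cons, List.mem_cons, true_or, and_true,
          beq_self_eq_true, if_true, hmem, hj, true_and]
        by_cases hd : x ∈ d <;> simp [hd]
      · simp [PySem.Set.mem_add, hx, List.count_cons, Ne.symm hx]
    · rw [if_neg (by simpa using hj)]
      rw [show (List.foldl _ _ t : PySem.Set Int × PySem.Set Int) = dfold t (PySem.Set.add s j) d from rfl, ih]
      by_cases hx : x = j
      · subst hx
        simp only [PySem.Set.mem_add, List.count_cons, List.mem_cons, true_or, or_true,
          and_true, true_and, beq_self_eq_true, if_true, hmem, hj, false_and, false_or]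
        by_cases hd : x ∈ d
        · simp [hd]
        · simp only [hd, false_or]
          omega
      · simp [PySem.Set.mem_add, hx, List.count_cons, Ne.symm hx]

-- per-element agreement of the two filtering conditions
theorem cond_eq (list1 : List Int) (i : Int) :
    ((list1.foldl (fun c j => if i == j then c + 1 else c) (0:Int)) ≤ 1
      ↔ ¬ PySem.Set.contains (dfold list1 PySem.Set.empty PySem.Set.empty).2 i = true) := by
  rw [count_fold]
  rw [show (PySem.Set.contains (dfold list1 PySem.Set.empty PySem.Set.empty).2 i = true)
      ↔ i ∈ (dfold list1 PySem.Set.empty PySem.Set.empty).2 from by simp]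
  rw [dup_fold list1 PySem.Set.empty PySem.Set.empty i]
  simp only [PySem.Set.empty, List.not_mem_nil, false_and, false_or]
  omega

theorem nonrep_eq (list1 list2 list3 : List Int) :
    NonRepeatingList list1 list2 list3 = NonRepeatingList_alt list1 list2 list3 := by
  show NonRepeatingList list1 list2 list3
      = list2.foldl (fun acc i =>
          if PySem.Set.contains (dfold list1 PySem.Set.empty PySem.Set.empty).2 i then acc
          else acc ++ [i]) list3
  unfold NonRepeatingList
  induction list2 generalizing list3 with
  | nil => rfl
  | cons i t ih =>
    simp only [List.foldl_cons]
    have h := cond_eq list1 i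
    by_cases hc : (list1.foldl (fun c j => if i == j then c + 1 else c) (0:Int)) ≤ 1
    · rw [if_pos hc, if_neg (h.mp hc)]
      exact ih (list3 ++ [i])
    · rw [if_neg hc, if_pos (by by_contra hnb; exact hc (h.mpr hnb))]
      exact ih list3

-- ===== VERDICT (by name: the statement is the Claim_ definition above) =====
theorem NonRepeatingList_spec : Claim_equal_NonRepeatingList := by
  intro list1 list2 list3 _
  exact nonrep_eq list1 list2 list3
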